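-- pv_equiv track=rewrite | github.com/hikimory/yandex_coderun | yandex_eserajim_sleepless_nights/5. Покрытие K отрезками/solution_.py | can_cover
-- ===== SOURCE A (Python) =====
-- from typing import List
--
-- def can_cover(points: List[int], k: int, length: int) -> bool:
--     segments_used: int = 1
--     current_segment_start: int = points[0]
--
--     for point in points[1:]:
--         if point > current_segment_start + length:
--             segments_used += 1
--             current_segment_start = point
--     return segments_used <= k
-- ===== SOURCE B (Python) =====
-- from typing import List
--
-- def can_cover(points: List[int], k: int, length: int) -> bool:
--     start = points[0]          # raises IndexError on empty input, like A
--     n = len(points)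
--
--     def run(lo: int, hi: int, anchor: int):
--         # Summarize points[lo:hi]: how many new segments are opened when the
--         # current segment starts at `anchor`, and what the final anchor is.
--         if hi - lo == 1:
--             p = points[lo]
--             return (1, p) if p > anchor + length else (0, anchor)
--         mid = (lo + hi) // 2
--         c1, a1 = run(lo, mid, anchor)
--         c2, a2 = run(mid, hi, a1)
--         return (c1 + c2, a2)
--
--     if n == 1:
--         return 1 <= k
--     opened, _ = run(1, n, start)
--     return 1 + opened <= k
-- ===== Notes on version B (the rewrite author's own statement) =====
-- stated objective: alternative
-- what changed: Replaced A's flat left-to-right scan with a running counter by a divide-and-conquer over index ranges that computes for each half a summary pair (segments opened, final anchor) and composes the two summaries; this is correct because the per-point update only needs the incoming anchor, so processing a range is the composition of processing its halves.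
import Mathlib
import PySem

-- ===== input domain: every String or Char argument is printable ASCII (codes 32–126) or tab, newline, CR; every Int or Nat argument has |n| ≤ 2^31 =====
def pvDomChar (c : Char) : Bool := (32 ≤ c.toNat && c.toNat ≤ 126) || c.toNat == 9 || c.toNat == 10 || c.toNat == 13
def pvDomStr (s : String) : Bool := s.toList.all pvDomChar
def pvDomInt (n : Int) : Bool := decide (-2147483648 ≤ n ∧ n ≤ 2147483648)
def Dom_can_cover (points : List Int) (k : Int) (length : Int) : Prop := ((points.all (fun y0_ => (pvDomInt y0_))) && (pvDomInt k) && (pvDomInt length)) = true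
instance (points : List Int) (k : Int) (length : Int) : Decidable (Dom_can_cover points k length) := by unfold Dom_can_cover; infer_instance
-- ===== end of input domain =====

-- B replaces A's flat left-to-right scan by a divide-and-conquer that summarizes each
-- half as (segments opened, final anchor) and composes the summaries (alternative
-- decomposition, same asymptotic cost).

-- ===== PORT A =====
-- A: segments_used = 1, start = points[0]; for point in points[1:]: if point > start+length: open new segment.
def can_cover (points : List Int) (k : Int) (length : Int) : Bool :=
  match PySem.List.pyGet? points 0 with
  | none => false   -- IndexError in Python; excluded by Pre_can_cover
  | some p0 =>
    let st := (PySem.List.slice points (some 1) none).foldl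
      (fun (s : Int × Int) point =>
        if point > s.2 + length then (s.1 + 1, point) else s) (1, p0)
    decide (st.1 ≤ k)

-- ===== PORT B =====
-- B's run(lo, hi, anchor) works on the index range lo..hi of `points`; the port carries
-- the corresponding sublist points[lo:hi] and splits it at mid = len // 2.
def runB (length : Int) (l : List Int) (anchor : Int) : Int × Int :=
  match l with
  | [] => (0, anchor)          -- unreachable from can_cover_alt (ranges are nonempty)
  | [p] => if p > anchor + length then (1, p) else (0, anchor)
  | x :: y :: tl =>
    let mid := (x :: y :: tl).length / 2
    let s1 := runB length ((x :: y :: tl).take mid) anchor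
    let s2 := runB length ((x :: y :: tl).drop mid) s1.2
    (s1.1 + s2.1, s2.2)
termination_by l.length
decreasing_by
  · simp [List.length_take]; omega
  · simp [List.length_drop]; omega

def can_cover_alt (points : List Int) (k : Int) (length : Int) : Bool :=
  match points with
  | [] => false   -- IndexError in Python; excluded by Pre_can_cover
  | [_] => decide ((1 : Int) ≤ k)
  | p0 :: q :: rest => decide (1 + (runB length (q :: rest) p0).1 ≤ k)

-- ===== PRECONDITION & SPEC =====
-- Pre_ excludes exactly the empty list, on which both Pythons raise IndexError at points[0].
def Pre_can_cover (points : List Int) (k : Int) (length : Int) : Prop := points ≠ []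
instance (points : List Int) (k : Int) (length : Int) : Decidable (Pre_can_cover points k length) := by unfold Pre_can_cover; infer_instance
def pvWitness_can_cover : List Int × Int × Int := ([0, 3, 7], 2, 2)
def Spec_can_cover (points : List Int) (k : Int) (length : Int) (out : Bool) : Prop := out = can_cover_alt points k length
instance (points : List Int) (k : Int) (length : Int) (out : Bool) : Decidable (Spec_can_cover points k length out) := by unfold Spec_can_cover; infer_instance

-- ===== CLAIM =====
def Claim_equal_can_cover : Prop := ∀ (points : List Int) (k : Int) (length : Int), Dom_can_cover points k length → Pre_can_cover points k length → Spec_can_cover points k length (can_cover points k length)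

-- ===== LEMMAS AND PROOFS =====

-- A's fold step, named for the proofs
def stepA (length : Int) (s : Int × Int) (point : Int) : Int × Int :=
  if point > s.2 + length then (s.1 + 1, point) else s

theorem foldl_stepA_shift (length : Int) (l : List Int) :
    ∀ (s : Int × Int), l.foldl (stepA length) s
      = (s.1 + (l.foldl (stepA length) (0, s.2)).1, (l.foldl (stepA length) (0, s.2)).2) := by
  induction l with
  | nil => intro s; simp
  | cons p tl ih =>
    intro s
    simp only [List.foldl_cons]
    by_cases hp : p > s.2 + length
    · simp only [stepA, if_pos hp]
      rw [ih (s.1 + 1, p), ih (0 + 1, p)]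
      simp only [Prod.mk.injEq]
      exact ⟨by omega, trivial⟩
    · simp only [stepA, if_neg hp]
      exact ih s

theorem runB_eq_foldl_aux (length : Int) :
    ∀ (n : Nat) (l : List Int), l.length ≤ n →
      ∀ (a : Int), runB length l a = l.foldl (stepA length) (0, a) := by
  intro n
  induction n with
  | zero =>
    intro l hl a
    match l with
    | [] => rw [runB]; simp
  | succ n ih =>
    intro l hl a
    match l with
    | [] => rw [runB]; simp
    | [p] => rw [runB]; simp [stepA]
    | x :: y :: tl =>
      rw [runB]
      have hmid1 : 1 ≤ (x :: y :: tl).length / 2 := by simp; omega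
      have hmidlt : (x :: y :: tl).length / 2 < (x :: y :: tl).length := by simp; omega
      have htake : ((x :: y :: tl).take ((x :: y :: tl).length / 2)).length ≤ n := by
        simp only [List.length_take]; simp at hl ⊢; omega
      have hdrop : ((x :: y :: tl).drop ((x :: y :: tl).length / 2)).length ≤ n := by
        simp only [List.length_drop]; simp at hl ⊢; omega
      rw [ih _ htake a, ih _ hdrop]
      conv_rhs => rw [← List.take_append_drop ((x :: y :: tl).length / 2) (x :: y :: tl),
        List.foldl_append]
      rw [foldl_stepA_shift length ((x :: y :: tl).drop ((x :: y :: tl).length / 2))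
          (((x :: y :: tl).take ((x :: y :: tl).length / 2)).foldl (stepA length) (0, a))]

theorem runB_eq_foldl (length : Int) (l : List Int) (a : Int) :
    runB length l a = l.foldl (stepA length) (0, a) :=
  runB_eq_foldl_aux length l.length l (le_refl _) a

theorem can_cover_eq (p0 : Int) (rest : List Int) (k length : Int) :
    can_cover (p0 :: rest) k length
      = decide ((rest.foldl (stepA length) (1, p0)).1 ≤ k) := by
  unfold can_cover
  rw [PySem.List.pyGet?_zero_cons]
  rw [PySem.List.slice_from_one, List.tail_cons]
  rfl

-- ===== VERDICT =====
theorem can_cover_spec : Claim_equal_can_cover := by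
  intro points k length _ hpre
  unfold Spec_can_cover
  match points with
  | [] => exact absurd rfl hpre
  | [p0] =>
    rw [can_cover_eq]
    rfl
  | p0 :: q :: rest =>
    rw [can_cover_eq]
    show _ = decide (1 + (runB length (q :: rest) p0).1 ≤ k)
    rw [runB_eq_foldl, foldl_stepA_shift length (q :: rest) (1, p0)]
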